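-- pv_equiv track=rewrite | github.com/px86/neetcode150 | bit-manipulation/SumOfTwoIntegers.py | getSumOfUnsigned
-- ===== SOURCE A (Python) =====
-- def getSumOfUnsigned(a: int, b: int) -> int:
--     carry_bit = 0
--     sum = 0
--     for i in range(32):
--         mask = 1 << i
--         a_bit = (a & mask) >> i
--         b_bit = (b & mask) >> i
--         if a_bit ^ b_bit ^ carry_bit:
--             sum |= 1 << i
--         if (a_bit & b_bit) | (a_bit & carry_bit) | (b_bit & carry_bit):
--             carry_bit = 1
--         else:
--             carry_bit = 0
--     return sum
-- ===== SOURCE B (Python) =====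
-- def getSumOfUnsigned(a: int, b: int) -> int:
--     # closed form: the 32-bit carry loop computes the low 32 bits of a+b
--     return (a + b) & 0xFFFFFFFF
-- ===== Notes on version B (the rewrite author's own statement) =====
-- stated objective: simpler
-- what changed: Replaced the 32-iteration per-bit full-adder carry loop with the closed form (a + b) & 0xFFFFFFFF, since the loop computes exactly the low 32 bits of the two's-complement sum.
import Mathlib
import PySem

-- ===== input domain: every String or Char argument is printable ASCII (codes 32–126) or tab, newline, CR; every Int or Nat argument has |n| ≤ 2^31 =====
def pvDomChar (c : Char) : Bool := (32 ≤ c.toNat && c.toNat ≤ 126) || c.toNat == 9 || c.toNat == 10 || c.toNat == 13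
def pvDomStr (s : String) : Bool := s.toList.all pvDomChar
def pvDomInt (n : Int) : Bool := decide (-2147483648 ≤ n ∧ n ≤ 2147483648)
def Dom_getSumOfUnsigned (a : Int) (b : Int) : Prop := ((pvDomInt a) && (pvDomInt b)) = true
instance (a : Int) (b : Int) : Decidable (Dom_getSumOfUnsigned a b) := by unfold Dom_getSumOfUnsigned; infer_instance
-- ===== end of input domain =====

-- B replaces A's 32-iteration per-bit full-adder carry loop with the closed form (a + b) & 0xFFFFFFFF (simpler; same value).

-- ===== PORT A =====
-- the body of A's for-loop; state = (carry_bit, sum).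
-- `1 << i`, `x >> i`: i comes from range(32) so i ≥ 0, and shifting by i.toNat is Python-exact;
-- `&`, `|`, `^` are PySem.Int.band/bor/bxor (Python-exact two's complement);
-- `if expr:` on ints is Python truthiness = expr ≠ 0.
def pvLoopBody (a b : Int) (st : Int × Int) (i : Int) : Int × Int :=
  let carry_bit := st.1
  let sum := st.2
  let mask := (1 : Int) <<< i.toNat
  let a_bit := (PySem.Int.band a mask) >>> i.toNat
  let b_bit := (PySem.Int.band b mask) >>> i.toNat
  let sum' := if PySem.Int.bxor (PySem.Int.bxor a_bit b_bit) carry_bit ≠ 0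
              then PySem.Int.bor sum ((1 : Int) <<< i.toNat) else sum
  let carry_bit' := if PySem.Int.bor (PySem.Int.bor (PySem.Int.band a_bit b_bit)
                      (PySem.Int.band a_bit carry_bit)) (PySem.Int.band b_bit carry_bit) ≠ 0
                    then (1 : Int) else (0 : Int)
  (carry_bit', sum')

def getSumOfUnsigned (a : Int) (b : Int) : Int :=
  ((PySem.List.pyRange 0 32 1).foldl (pvLoopBody a b) (0, 0)).2

-- ===== PORT B =====
def getSumOfUnsigned_alt (a : Int) (b : Int) : Int :=
  PySem.Int.band (a + b) 4294967295

-- ===== PRECONDITION & SPEC =====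
def Spec_getSumOfUnsigned (a : Int) (b : Int) (out : Int) : Prop := out = getSumOfUnsigned_alt a b
instance (a : Int) (b : Int) (out : Int) : Decidable (Spec_getSumOfUnsigned a b out) := by unfold Spec_getSumOfUnsigned; infer_instance

-- ===== CLAIM (what is proved, stated in full; the proofs are below) =====
def Claim_equal_getSumOfUnsigned : Prop := ∀ (a : Int) (b : Int), Dom_getSumOfUnsigned a b → Spec_getSumOfUnsigned a b (getSumOfUnsigned a b)

-- ===== LEMMAS AND PROOFS =====

-- div/mod uniqueness helper
theorem pv_divmod {x M q r : Int} (hM : 0 < M) (heq : M * q + r = x)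
    (h0 : 0 ≤ r) (h1 : r < M) : x / M = q ∧ x % M = r :=
  (Int.ediv_emod_unique hM).2 ⟨by linarith, h0, h1⟩

theorem pv_q0 {x M : Int} (h0 : 0 ≤ x) (h : x < M) : x / M = 0 :=
  Int.ediv_eq_zero_of_lt h0 h

theorem pv_q1 {x M : Int} (hM : 0 < M) (h1 : M ≤ x) (h : x < 2*M) : x / M = 1 :=
  (pv_divmod hM (q := 1) (r := x - M) (by ring) (by omega) (by omega)).1

theorem pv_one_shiftLeft (n : Nat) : (1 : Int) <<< n = 2^n := by
  have : ((1 : Nat) : Int) <<< n = (((1 <<< n : Nat)) : Int) := (Int.natCast_shiftLeft 1 n).symm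
  simpa [Nat.shiftLeft_eq] using this

theorem pv_nat_or_two_pow {s n : Nat} (h : s < 2^n) : s ||| 2^n = 2^n + s := by
  apply Nat.eq_of_testBit_eq
  intro i
  rw [Nat.testBit_lor, Nat.testBit_two_pow]
  rcases lt_trichotomy i n with hi|rfl|hi
  · rw [Nat.testBit_two_pow_add_gt hi]
    simp [Nat.ne_of_gt hi]
  · rw [Nat.testBit_two_pow_add_eq, Nat.testBit_lt_two_pow h]
    simp
  · have h2 : (2:Nat)^n + s < 2^i := by
      have : (2:Nat)^(n+1) ≤ 2^i := Nat.pow_le_pow_right (by norm_num) hi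
      have := Nat.pow_lt_pow_right (a := 2) (by norm_num) hi
      omega
    rw [Nat.testBit_lt_two_pow h2, Nat.testBit_lt_two_pow (lt_trans h (by exact Nat.pow_lt_pow_right (by norm_num) hi))]
    simp [Nat.ne_of_lt hi]

theorem pv_split {x M : Int} (hM : 0 < M) :
    x % (2*M) = x % M + ((x / M) % 2) * M ∧ x / (2*M) = (x / M) / 2 := by
  have hd := Int.mul_ediv_add_emod x M
  have hd2 := Int.mul_ediv_add_emod (x / M) 2
  have hr0 : 0 ≤ x % M := Int.emod_nonneg x (by omega)
  have hr1 : x % M < M := Int.emod_lt_of_pos x hM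
  have hm2 : (x / M) % 2 = 0 ∨ (x / M) % 2 = 1 := Int.emod_two_eq (x / M)
  have h := pv_divmod (x := x) (M := 2*M) (q := (x / M) / 2)
      (r := x % M + ((x / M) % 2) * M) (by omega)
      (by nlinarith [hd, hd2]) (by rcases hm2 with h|h <;> rw [h] <;> omega)
      (by rcases hm2 with h|h <;> rw [h] <;> omega)
  exact ⟨h.2, h.1⟩

theorem pv_bit (n : Nat) (x : Int) :
    (PySem.Int.band x ((2:Int)^n)) >>> n = (x / 2^n) % 2 := by
  have h2 : (0:Int) ≤ 2^n := by positivity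
  have h2n : ((2:Int)^n).toNat = 2^n := by
    rw [show ((2:Int)^n) = (((2^n : Nat)) : Int) by push_cast; ring, Int.toNat_natCast]
  unfold PySem.Int.band
  by_cases hx : 0 ≤ x
  · rw [if_pos hx, if_pos h2, h2n]
    rw [Nat.and_two_pow, ← Int.natCast_shiftRight, Nat.shiftRight_eq_div_pow,
        Nat.mul_div_cancel _ (by positivity), Nat.toNat_testBit]
    rw [show x = ((x.toNat : Nat) : Int) by omega]
    push_cast
    simp
  · -- x < 0 : Python two's complement branch
    rw [if_neg hx, if_pos h2, h2n]
    set y : Nat := (-x - 1).toNat with hy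
    have hxy : x = -1 - (y : Int) := by omega
    have hb : (2:Nat)^n &&& y = (y.testBit n).toNat * 2^n := by
      rw [Nat.and_comm, Nat.and_two_pow]
    rw [hb, Nat.toNat_testBit]
    -- characterize x / 2^n and its parity
    have hQ : ((y : Int)) / 2^n = ((y / 2^n : Nat) : Int) := (Int.natCast_ediv y (2^n)).symm ▸ by push_cast; ring
    have hdy := Int.mul_ediv_add_emod (y : Int) (2^n)
    have hr0 : (0:Int) ≤ (y:Int) % 2^n := Int.emod_nonneg _ (by positivity)
    have hr1 : (y:Int) % 2^n < 2^n := Int.emod_lt_of_pos _ (by positivity)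
    have hx2 := pv_divmod (x := x) (M := 2^n) (q := -((y:Int)/2^n) - 1)
        (r := 2^n - 1 - (y:Int) % 2^n) (by positivity)
        (by linear_combination -hdy - hxy) (by omega) (by omega)
    have hQ2 : ((y:Int)/2^n) % 2 = ((y / 2^n % 2 : Nat) : Int) := by push_cast; ring
    obtain ⟨hq1, -⟩ := hx2
    rw [hq1]
    rcases Nat.mod_two_eq_zero_or_one (y / 2^n) with h|h
    · rw [h, ← Int.natCast_shiftRight]
      simp only [Nat.zero_mul, Nat.sub_zero, Nat.shiftRight_eq_div_pow,
        Nat.div_self (Nat.two_pow_pos n)]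
      rw [h] at hQ2; push_cast at hQ2
      omega
    · rw [h, ← Int.natCast_shiftRight]
      simp only [Nat.one_mul, Nat.sub_self, Nat.shiftRight_eq_div_pow, Nat.zero_div]
      rw [h] at hQ2; push_cast at hQ2
      omega

theorem pv_or {n : Nat} {s : Int} (h0 : 0 ≤ s) (h1 : s < 2^n) :
    PySem.Int.bor s ((2:Int)^n) = s + 2^n := by
  have h2 : (0:Int) ≤ 2^n := by positivity
  rw [PySem.Int.bor_of_nonneg h0 h2]
  have h2n : ((2:Int)^n).toNat = 2^n := by
    rw [show ((2:Int)^n) = (((2^n : Nat)) : Int) by push_cast; ring, Int.toNat_natCast]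
  rw [h2n, pv_nat_or_two_pow (by omega)]
  push_cast
  omega

theorem pv_mask (x : Int) : PySem.Int.band x ((2:Int)^32 - 1) = x % 2^32 := by
  have h2 : (0:Int) ≤ 2^32 - 1 := by norm_num
  have h2n : ((2:Int)^32 - 1).toNat = 2^32 - 1 := by decide
  unfold PySem.Int.band
  by_cases hx : 0 ≤ x
  · rw [if_pos hx, if_pos h2, h2n, Nat.and_two_pow_sub_one_eq_mod]
    rw [show x = ((x.toNat : Nat) : Int) by omega]
    push_cast
    simp
  · rw [if_neg hx, if_pos h2, h2n]
    set y : Nat := (-x - 1).toNat with hy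
    have hxy : x = -1 - (y : Int) := by omega
    rw [show (2^32 - 1 : Nat) &&& y = y &&& (2^32 - 1) from Nat.and_comm _ _,
        Nat.and_two_pow_sub_one_eq_mod]
    have hdy := Int.mul_ediv_add_emod (y : Int) (2^32)
    have hr0 : (0:Int) ≤ (y:Int) % 2^32 := Int.emod_nonneg _ (by norm_num)
    have hr1 : (y:Int) % 2^32 < 2^32 := Int.emod_lt_of_pos _ (by norm_num)
    have hx2 := pv_divmod (x := x) (M := 2^32) (q := -((y:Int)/2^32) - 1)
        (r := 2^32 - 1 - (y:Int) % 2^32) (by norm_num)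
        (by linear_combination -hdy - hxy) (by omega) (by omega)
    rw [hx2.2]
    have : (((y % 2^32 : Nat)) : Int) = (y:Int) % 2^32 := by push_cast; ring
    omega

theorem pv_range : PySem.List.pyRange 0 32 1 = (List.range 32).map (Int.ofNat) := by
  decide

theorem pv_bxor00 : PySem.Int.bxor 0 0 = 0 := by decide
theorem pv_bxor01 : PySem.Int.bxor 0 1 = 1 := by decide
theorem pv_bxor10 : PySem.Int.bxor 1 0 = 1 := by decide
theorem pv_bxor11 : PySem.Int.bxor 1 1 = 0 := by decide
theorem pv_band00 : PySem.Int.band 0 0 = 0 := by decide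
theorem pv_band01 : PySem.Int.band 0 1 = 0 := by decide
theorem pv_band10 : PySem.Int.band 1 0 = 0 := by decide
theorem pv_band11 : PySem.Int.band 1 1 = 1 := by decide
theorem pv_bor00 : PySem.Int.bor 0 0 = 0 := by decide
theorem pv_bor01 : PySem.Int.bor 0 1 = 1 := by decide
theorem pv_bor10 : PySem.Int.bor 1 0 = 1 := by decide
theorem pv_bor11 : PySem.Int.bor 1 1 = 1 := by decide

theorem pv_inv (a b : Int) (n : Nat) :
    ((List.range n).map (Int.ofNat)).foldl (pvLoopBody a b) (0, 0)
      = ((a % 2^n + b % 2^n) / 2^n, (a + b) % 2^n) := by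
  induction n with
  | zero => simp
  | succ n ih =>
    rw [List.range_succ, List.map_append, List.foldl_append, ih]
    have hM : (0:Int) < 2^n := by positivity
    have hra0 : 0 ≤ a % 2^n := Int.emod_nonneg a (by omega)
    have hra1 : a % 2^n < 2^n := Int.emod_lt_of_pos a hM
    have hrb0 : 0 ≤ b % 2^n := Int.emod_nonneg b (by omega)
    have hrb1 : b % 2^n < 2^n := Int.emod_lt_of_pos b hM
    have hs0 : 0 ≤ (a + b) % 2^n := Int.emod_nonneg _ (by omega)
    have hs1 : (a + b) % 2^n < 2^n := Int.emod_lt_of_pos _ hM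
    have hkey : a % 2^n + b % 2^n = 2^n * ((a % 2^n + b % 2^n) / 2^n) + (a + b) % 2^n := by
      have h1 : (a + b) % 2^n = (a % 2^n + b % 2^n) % 2^n := by rw [Int.add_emod]
      have h2 := Int.mul_ediv_add_emod (a % 2^n + b % 2^n) ((2:Int)^n)
      omega
    have hc01 : (a % 2^n + b % 2^n) / 2^n = 0 ∨ (a % 2^n + b % 2^n) / 2^n = 1 := by
      rcases lt_or_ge (a % 2^n + b % 2^n) (2^n) with h|h
      · exact Or.inl (pv_q0 (by omega) h)
      · exact Or.inr (pv_q1 hM h (by omega))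
    have hq : (a + b) / 2^n = a / 2^n + b / 2^n + (a % 2^n + b % 2^n) / 2^n := by
      have hda := Int.mul_ediv_add_emod a ((2:Int)^n)
      have hdb := Int.mul_ediv_add_emod b ((2:Int)^n)
      exact (pv_divmod hM (by linarith [hkey]) hs0 hs1).1
    have hton : (Int.ofNat n).toNat = n := rfl
    simp only [List.map_cons, List.map_nil, List.foldl_cons, List.foldl_nil, pvLoopBody,
      hton, pv_one_shiftLeft, pv_bit]
    have hsplS := pv_split (x := a + b) (M := 2^n) hM
    have hsplA := pv_split (x := a) (M := 2^n) hM
    have hsplB := pv_split (x := b) (M := 2^n) hM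
    have hpow : (2:Int)^(n+1) = 2*(2^n) := by ring
    have hqm : (a + b) / 2^n % 2
        = (a / 2^n % 2 + b / 2^n % 2 + (a % 2^n + b % 2^n) / 2^n) % 2 := by
      rw [hq]; omega
    rw [hpow, hsplA.1, hsplB.1, hsplS.1, hqm]
    rcases Int.emod_two_eq (a / 2^n) with hA|hA <;>
      rcases Int.emod_two_eq (b / 2^n) with hB|hB <;>
      rcases hc01 with hC|hC <;>
      rw [hC] at hkey <;>
      rw [hA, hB, hC] <;>
      norm_num [pv_bxor00, pv_bxor01, pv_bxor10, pv_bxor11, pv_band00, pv_band01, pv_band10,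
        pv_band11, pv_bor00, pv_bor01, pv_bor10, pv_bor11, pv_or hs0 hs1, Prod.mk.injEq] <;>
      first
        | exact (pv_q0 (by omega) (by omega)).symm
        | exact (pv_q1 (by positivity) (by omega) (by omega)).symm

-- ===== VERDICT (by name: the statement is the Claim_ definition above) =====
theorem getSumOfUnsigned_spec : Claim_equal_getSumOfUnsigned := by
  intro a b _hDom
  unfold Spec_getSumOfUnsigned getSumOfUnsigned getSumOfUnsigned_alt
  rw [pv_range, pv_inv]
  rw [show (4294967295 : Int) = 2^32 - 1 by norm_num, pv_mask]
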